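-- pv_equiv track=rewrite | github.com/knarrnet/knarr.skills | infra/skill-cache-mock-lite/handler.py | _generate_synthetic
-- ===== SOURCE A (Python) =====
-- from typing import Any, Dict
--
-- def _synthetic_value(key: str) -> str:
--     """Generate a plausible placeholder from the output schema key name."""
--     k = key.lower()
--     if "status" in k:
--         return "ok"
--     if "error" in k:
--         return ""
--     if "count" in k or "total" in k:
--         return "1"
--     if "score" in k or "pct" in k or "percent" in k or "confidence" in k:
--         return "0.75"
--     if "hash" in k or "asset" in k:
--         return "mock_asset_0000000000000000000000000000000000000000000000000000000000000000"
--     if "ext" in k: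
--         return "wav"
--     if "bytes" in k or "size" in k:
--         return "1024"
--     if "path" in k or "url" in k:
--         return "https://example.com/mock"
--     if k.endswith("_json") or "json" in k:
--         return "[]"
--     if "ms" in k or "latency" in k or "duration" in k:
--         return "50"
--     if "engine" in k or "model" in k:
--         return "mock"
--     if "voice" in k or "speaker" in k:
--         return "mock_voice"
--     if "text" in k or "content" in k or "description" in k:
--         return "Mock output text for testing."
--     if "title" in k or "name" in k:
--         return "Mock Title"
--     return "mock_value"
--
-- def _generate_synthetic(output_schema: Dict[str, str]) -> Dict[str, str]:
--     """Generate synthetic output from schema keys."""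
--     result: Dict[str, str] = {}
--     for key in output_schema:
--         result[key] = _synthetic_value(key)
--     if not result:
--         result["status"] = "ok"
--         result["mock_note"] = "No output_schema available; returning minimal synthetic output"
--     return result
-- ===== SOURCE B (Python) =====
-- # Inverted loop nesting: every key starts at "mock_value", then the rule table is
-- # swept in reverse priority order, overwriting matching keys so the highest-priority
-- # match wins by being written last (same return values as the per-key cascade).
-- _RULES = [
--     (("status",), "ok"),
--     (("error",), ""),
--     (("count", "total"), "1"),
--     (("score", "pct", "percent", "confidence"), "0.75"),
--     (("hash", "asset"), "mock_asset_" + "0" * 64),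
--     (("ext",), "wav"),
--     (("bytes", "size"), "1024"),
--     (("path", "url"), "https://example.com/mock"),
--     (("json",), "[]"),
--     (("ms", "latency", "duration"), "50"),
--     (("engine", "model"), "mock"),
--     (("voice", "speaker"), "mock_voice"),
--     (("text", "content", "description"), "Mock output text for testing."),
--     (("title", "name"), "Mock Title"),
-- ]
--
--
-- def _generate_synthetic(output_schema):
--     if not output_schema:
--         return {
--             "status": "ok",
--             "mock_note": "No output_schema available; returning minimal synthetic output",
--         }
--     result = {key: "mock_value" for key in output_schema}
--     for keywords, value in reversed(_RULES):
--         for key in result: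
--             if any(w in key.lower() for w in keywords):
--                 result[key] = value
--     return result
-- ===== Notes on version B (the rewrite author's own statement) =====
-- stated objective: alternative
-- what changed: Loop nesting is inverted: instead of running a per-key first-match keyword cascade, B initialises every key to 'mock_value' and then sweeps the rule table in reverse priority order, overwriting the value of every key that matches the current rule, so the highest-priority match wins by being written last ('_json' collapsed into 'json'); the empty-schema fallback is returned up front as a literal dict.
import Mathlib
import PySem

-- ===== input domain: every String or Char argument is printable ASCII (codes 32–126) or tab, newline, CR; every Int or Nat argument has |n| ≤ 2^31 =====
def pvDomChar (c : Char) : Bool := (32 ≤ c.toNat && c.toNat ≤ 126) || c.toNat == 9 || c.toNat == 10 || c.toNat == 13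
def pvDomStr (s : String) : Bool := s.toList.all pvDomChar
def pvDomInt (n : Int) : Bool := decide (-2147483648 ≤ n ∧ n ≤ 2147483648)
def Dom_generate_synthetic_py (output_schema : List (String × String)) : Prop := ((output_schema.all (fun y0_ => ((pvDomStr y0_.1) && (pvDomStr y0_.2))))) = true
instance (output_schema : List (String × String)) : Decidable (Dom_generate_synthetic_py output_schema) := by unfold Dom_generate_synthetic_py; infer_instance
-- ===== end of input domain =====

-- B inverts the loop nesting: every key starts at "mock_value" and the rule table is swept in
-- reverse priority order, overwriting matching keys so the highest-priority match wins by being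
-- written last; return values are identical (objective: alternative).

-- ===== PORT A =====
def synthetic_value (key : String) : String :=
  let k := PySem.Str.lower key
  if PySem.Str.isIn "status" k then "ok"
  else if PySem.Str.isIn "error" k then ""
  else if PySem.Str.isIn "count" k || PySem.Str.isIn "total" k then "1"
  else if PySem.Str.isIn "score" k || PySem.Str.isIn "pct" k || PySem.Str.isIn "percent" k || PySem.Str.isIn "confidence" k then "0.75"
  else if PySem.Str.isIn "hash" k || PySem.Str.isIn "asset" k then "mock_asset_0000000000000000000000000000000000000000000000000000000000000000"
  else if PySem.Str.isIn "ext" k then "wav"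
  else if PySem.Str.isIn "bytes" k || PySem.Str.isIn "size" k then "1024"
  else if PySem.Str.isIn "path" k || PySem.Str.isIn "url" k then "https://example.com/mock"
  else if PySem.Str.endswith k "_json" || PySem.Str.isIn "json" k then "[]"
  else if PySem.Str.isIn "ms" k || PySem.Str.isIn "latency" k || PySem.Str.isIn "duration" k then "50"
  else if PySem.Str.isIn "engine" k || PySem.Str.isIn "model" k then "mock"
  else if PySem.Str.isIn "voice" k || PySem.Str.isIn "speaker" k then "mock_voice"
  else if PySem.Str.isIn "text" k || PySem.Str.isIn "content" k || PySem.Str.isIn "description" k then "Mock output text for testing."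
  else if PySem.Str.isIn "title" k || PySem.Str.isIn "name" k then "Mock Title"
  else "mock_value"

def generate_synthetic_py (output_schema : List (String × String)) : List (String × String) :=
  let result : PySem.Dict String String :=
    output_schema.foldl (fun r p => r.insert p.1 (synthetic_value p.1)) PySem.Dict.empty
  if result.size == 0 then
    ((result.insert "status" "ok").insert "mock_note"
      "No output_schema available; returning minimal synthetic output").items
  else
    result.items

-- ===== PORT B =====
def synthRules : List (List String × String) :=
  [ (["status"], "ok")
  , (["error"], "")
  , (["count", "total"], "1")
  , (["score", "pct", "percent", "confidence"], "0.75")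
  , (["hash", "asset"], "mock_asset_0000000000000000000000000000000000000000000000000000000000000000")
  , (["ext"], "wav")
  , (["bytes", "size"], "1024")
  , (["path", "url"], "https://example.com/mock")
  , (["json"], "[]")
  , (["ms", "latency", "duration"], "50")
  , (["engine", "model"], "mock")
  , (["voice", "speaker"], "mock_voice")
  , (["text", "content", "description"], "Mock output text for testing.")
  , (["title", "name"], "Mock Title") ]

-- one inner pass of B: 'for key in result: if any(w in key.lower() …): result[key] = value'
def ruleStep (rule : List String × String) (kv : String × String) : String × String :=
  if rule.1.any (fun w => PySem.Str.isIn w (PySem.Str.lower kv.1)) then (kv.1, rule.2) else kv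

def generate_synthetic_py_alt (output_schema : List (String × String)) : List (String × String) :=
  match output_schema with
  | [] => [("status", "ok"),
           ("mock_note", "No output_schema available; returning minimal synthetic output")]
  | _ =>
    let init := (output_schema.foldl (fun d p => d.insert p.1 "mock_value")
      (PySem.Dict.empty : PySem.Dict String String)).items
    synthRules.reverse.foldl (fun items rule => items.map (ruleStep rule)) init

-- ===== PRECONDITION & SPEC =====
def Spec_generate_synthetic_py (output_schema : List (String × String)) (out : List (String × String)) : Prop := out = generate_synthetic_py_alt output_schema
instance (output_schema : List (String × String)) (out : List (String × String)) : Decidable (Spec_generate_synthetic_py output_schema out) := by unfold Spec_generate_synthetic_py; infer_instance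

-- ===== CLAIM (what is proved, stated in full; the proofs are below) =====
def Claim_equal_generate_synthetic_py : Prop := ∀ (output_schema : List (String × String)), Dom_generate_synthetic_py output_schema → Spec_generate_synthetic_py output_schema (generate_synthetic_py output_schema)

-- ===== LEMMAS AND PROOFS =====

-- a fold of whole-list map passes is the map of the per-element fold
theorem foldl_map_fold {α β : Type} (rules : List β) (step : β → α → α) (items : List α) :
    rules.foldl (fun its r => its.map (step r)) items
      = items.map (fun kv => rules.foldl (fun kv r => step r kv) kv) := by
  induction rules generalizing items with
  | nil => simp
  | cons r t ih => simp [ih, List.map_map, Function.comp_def]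

-- ruleStep never changes the key, so the pair fold is a fold on the value
theorem ruleStep_fold_val (rules : List (List String × String)) (key v : String) :
    rules.foldl (fun kv r => ruleStep r kv) (key, v)
      = (key, rules.foldl
          (fun v r => if r.1.any (fun w => PySem.Str.isIn w (PySem.Str.lower key)) then r.2 else v)
          v) := by
  induction rules generalizing v with
  | nil => rfl
  | cons r t ih =>
    rw [List.foldl_cons, List.foldl_cons]
    have hstep : ruleStep r (key, v)
        = (key, if r.1.any (fun w => PySem.Str.isIn w (PySem.Str.lower key)) then r.2 else v) := by
      unfold ruleStep
      dsimp only
      by_cases h : r.1.any (fun w => PySem.Str.isIn w (PySem.Str.lower key)) = true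
      · rw [if_pos h, if_pos h]
      · rw [if_neg h, if_neg h]
    rw [hstep]
    exact ih _

-- endswith '_json' already implies the substring 'json', so A's disjunction collapses
theorem json_cond (k : String) :
    (PySem.Str.endswith k "_json" || PySem.Str.isIn "json" k) = PySem.Str.isIn "json" k := by
  cases h : PySem.Str.endswith k "_json" with
  | false => simp
  | true =>
    have hs : ("_json".toList : List Char) <:+ k.toList := by
      simpa using (PySem.Chars.endswith_iff _ _).mp (by simpa using h)
    have hin : PySem.Str.isIn "json" k = true := by
      rw [PySem.Str.isIn_iff_infix]
      exact List.IsInfix.trans (l₂ := "_json".toList) (by decide) hs.isInfix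
    simpa using hin

-- the reversed rule table written out (so the value fold unfolds to a nested if-chain)
theorem rev_rules : synthRules.reverse =
  [ (["title", "name"], "Mock Title")
  , (["text", "content", "description"], "Mock output text for testing.")
  , (["voice", "speaker"], "mock_voice")
  , (["engine", "model"], "mock")
  , (["ms", "latency", "duration"], "50")
  , (["json"], "[]")
  , (["path", "url"], "https://example.com/mock")
  , (["bytes", "size"], "1024")
  , (["ext"], "wav")
  , (["hash", "asset"], "mock_asset_0000000000000000000000000000000000000000000000000000000000000000")
  , (["score", "pct", "percent", "confidence"], "0.75")
  , (["count", "total"], "1")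
  , (["error"], "")
  , (["status"], "ok") ] := by rfl

-- last write wins: the reverse value sweep from "mock_value" computes A's cascade
theorem val_fold_eq (key : String) :
    synthRules.reverse.foldl
        (fun v r => if r.1.any (fun w => PySem.Str.isIn w (PySem.Str.lower key)) then r.2 else v)
        "mock_value"
      = synthetic_value key := by
  rw [rev_rules]
  unfold synthetic_value
  simp only [json_cond, List.foldl_cons, List.foldl_nil, List.any_cons, List.any_nil,
    Bool.or_false, ← Bool.or_assoc]

-- relation between A's insert fold and B's "mock_value" insert fold, item by item
theorem items_fold_rel (schema : List (String × String)) (d₁ d₂ : PySem.Dict String String)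
    (h : d₁.items = d₂.items.map (fun kv => (kv.1, synthetic_value kv.1))) :
    (schema.foldl (fun r p => r.insert p.1 (synthetic_value p.1)) d₁).items
      = ((schema.foldl (fun r p => r.insert p.1 "mock_value") d₂).items).map
          (fun kv => (kv.1, synthetic_value kv.1)) := by
  induction schema generalizing d₁ d₂ with
  | nil => exact h
  | cons p t ih =>
    simp only [List.foldl_cons]
    refine ih _ _ ?_
    have hkeys : d₁.keys = d₂.keys := by
      simp only [PySem.Dict.keys, h, List.map_map, Function.comp_def]
    have hcont : d₁.contains p.1 = d₂.contains p.1 := by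
      rw [PySem.Dict.contains_eq_decide_mem_keys, PySem.Dict.contains_eq_decide_mem_keys, hkeys]
    by_cases hc : d₂.contains p.1 = true
    · rw [PySem.Dict.items_insert, PySem.Dict.items_insert, hcont, if_pos hc, if_pos hc, h,
        List.map_map, List.map_map]
      refine List.map_congr_left ?_
      intro q _
      simp only [Function.comp_def]
      by_cases hq : q.1 = p.1
      · simp [hq]
      · simp [hq]
    · rw [PySem.Dict.items_insert, PySem.Dict.items_insert, hcont, if_neg hc, if_neg hc,
        List.map_append, h]
      rfl

-- every value produced by B's initial pass is "mock_value"
theorem mock_values (schema : List (String × String)) (d : PySem.Dict String String)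
    (h : ∀ kv ∈ d.items, kv.2 = "mock_value") :
    ∀ kv ∈ (schema.foldl (fun r p => r.insert p.1 "mock_value") d).items,
      kv.2 = "mock_value" := by
  induction schema generalizing d with
  | nil => exact h
  | cons p t ih =>
    simp only [List.foldl_cons]
    refine ih _ ?_
    intro kv hkv
    rcases (PySem.Dict.mem_items_insert _ _ _ _).mp hkv with h1 | h1
    · rw [h1]
    · exact h kv h1.1

theorem size_foldl_insert_pos (rest : List (String × String)) (d : PySem.Dict String String)
    (h : 0 < d.size) :
    0 < (rest.foldl (fun r p => r.insert p.1 (synthetic_value p.1)) d).size := by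
  induction rest generalizing d with
  | nil => exact h
  | cons q t ih =>
    refine ih _ ?_
    have := PySem.Dict.items_insert (d := d) (k := q.1) (v := synthetic_value q.1)
    simp only [PySem.Dict.size]
    rw [this]
    split <;> simp_all [PySem.Dict.size]

-- ===== VERDICT (by name: the statement is the Claim_ definition above) =====
theorem generate_synthetic_py_spec : Claim_equal_generate_synthetic_py := by
  intro output_schema _
  show generate_synthetic_py output_schema = generate_synthetic_py_alt output_schema
  cases output_schema with
  | nil => decide
  | cons p rest =>
    unfold generate_synthetic_py generate_synthetic_py_alt
    have hpos : 0 < ((p :: rest).foldl (fun r q => r.insert q.1 (synthetic_value q.1))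
        (PySem.Dict.empty : PySem.Dict String String)).size := by
      refine size_foldl_insert_pos rest _ ?_
      simp [PySem.Dict.size, PySem.Dict.insert, PySem.Dict.empty]
    rw [List.foldl_cons] at hpos
    simp only []
    rw [if_neg (by rw [List.foldl_cons]; simp only [beq_iff_eq]; omega)]
    rw [foldl_map_fold]
    have hmock := mock_values (p :: rest) (PySem.Dict.empty : PySem.Dict String String)
      (by intro kv hkv; simp [PySem.Dict.empty] at hkv)
    rw [items_fold_rel (p :: rest) PySem.Dict.empty PySem.Dict.empty (by rfl)]
    refine List.map_congr_left ?_
    intro kv hkv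
    have hv : kv.2 = "mock_value" := hmock kv hkv
    calc (kv.1, synthetic_value kv.1)
        = synthRules.reverse.foldl (fun x r => ruleStep r x) (kv.1, kv.2) := by
          rw [ruleStep_fold_val, hv, val_fold_eq]
      _ = _ := by rfl
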